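-- pv_equiv track=rewrite | github.com/knowah/bsseq-tools | sort_chroms.py | sorted_chroms
-- ===== SOURCE A (Python) =====
-- def sorted_chroms(chroms):
-- 	chr_name_count = sum([c.startswith('chr') for c in chroms])
-- 	if chr_name_count == len(chroms):
-- 		chroms = [c[3:] for c in chroms]
-- 	elif chr_name_count > 0:
-- 		raise ValueError("Inconsistent naming scheme of chromosomes (some begin with 'chr', others do not)")
--
-- 	num_chroms = []
-- 	alpha_chroms_X = []
-- 	alpha_chroms_Y = []
-- 	alpha_chroms_M = []
-- 	alpha_chroms_other = []
-- 	for split_chrom in [c.split('_', 1) for c in chroms]: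
-- 		if split_chrom[0].isdigit():
-- 			num_chroms.append([int(split_chrom[0])] + split_chrom[1:])
-- 		elif split_chrom[0] == 'X':
-- 			alpha_chroms_X.append(split_chrom)
-- 		elif split_chrom[0] == 'Y':
-- 			alpha_chroms_Y.append(split_chrom)
-- 		elif split_chrom[0] == 'M':
-- 			alpha_chroms_M.append(split_chrom)
-- 		else:
-- 			alpha_chroms_other.append(split_chrom)
--
-- 	num_chroms.sort()
-- 	alpha_chroms_X.sort()
-- 	alpha_chroms_Y.sort()
-- 	alpha_chroms_M.sort()
-- 	alpha_chroms_other.sort()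
--
-- 	num_chroms = [[str(c[0])] + c[1:] for c in num_chroms]
--
-- 	ordered_chroms = ['_'.join(sc) for sc in \
-- 	num_chroms + alpha_chroms_X + alpha_chroms_Y + alpha_chroms_M + alpha_chroms_other]
--
-- 	if chr_name_count > 0:
-- 		ordered_chroms = ['chr'+c for c in ordered_chroms]
--
-- 	return ordered_chroms
-- ===== SOURCE B (Python) =====
-- def sorted_chroms(chroms):
-- 	chr_name_count = sum(c.startswith('chr') for c in chroms)
-- 	if chr_name_count == len(chroms):
-- 		chroms = [c[3:] for c in chroms]
-- 	elif chr_name_count > 0: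
-- 		raise ValueError("Inconsistent naming scheme of chromosomes (some begin with 'chr', others do not)")
--
-- 	CATEGORY = {'X': 1, 'Y': 2, 'M': 3}
-- 	keyed = []
-- 	for c in chroms:
-- 		parts = c.split('_', 1)
-- 		head, rest = parts[0], parts[1:]
-- 		if head.isdigit():
-- 			keyed.append(((0, int(head), rest), '_'.join([str(int(head))] + rest)))
-- 		else:
-- 			keyed.append(((CATEGORY.get(head, 4), 0, parts), '_'.join(parts)))
-- 	keyed.sort(key=lambda kv: kv[0])
--
-- 	ordered_chroms = [v for _, v in keyed]
-- 	if chr_name_count > 0: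
-- 		ordered_chroms = ['chr' + c for c in ordered_chroms]
-- 	return ordered_chroms
-- ===== Notes on version B (the rewrite author's own statement) =====
-- stated objective: alternative
-- what changed: A partitions split chromosome names into five buckets (numeric/X/Y/M/other), sorts each bucket separately and concatenates; B maps each name once to a (sort_key, output_string) pair and performs a single keyed sort. Pre_ excludes only the mixed-naming inputs on which both A and B raise ValueError.
import Mathlib
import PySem

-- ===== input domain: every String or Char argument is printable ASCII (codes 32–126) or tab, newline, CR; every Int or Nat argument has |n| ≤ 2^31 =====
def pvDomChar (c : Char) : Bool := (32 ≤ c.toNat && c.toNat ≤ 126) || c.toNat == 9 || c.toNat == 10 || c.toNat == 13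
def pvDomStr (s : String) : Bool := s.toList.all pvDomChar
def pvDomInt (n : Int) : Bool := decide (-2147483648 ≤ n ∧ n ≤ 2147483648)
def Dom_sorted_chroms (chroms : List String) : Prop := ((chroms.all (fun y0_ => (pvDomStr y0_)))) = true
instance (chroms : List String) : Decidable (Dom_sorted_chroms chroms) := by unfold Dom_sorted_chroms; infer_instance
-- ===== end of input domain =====

-- B replaces A's five-bucket partition-then-sort-each-then-concatenate by one single keyed
-- sort of (sort_key, output_string) pairs (objective: alternative decomposition, same cost).

-- ===== PORT A =====
-- sum([c.startswith('chr') for c in chroms])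
def pyA_count (chroms : List String) : Int :=
  (chroms.map (fun c => if PySem.Str.startswith c "chr" then (1 : Int) else 0)).sum

-- c.split('_', 1); the separator is nonempty so splitMax? is always `some`
def pyA_split (c : String) : List String :=
  (PySem.Str.splitMax? c "_" 1).getD []

-- the five-bucket for-loop; split('_',1) is always nonempty, so split[0] is headI and
-- split[1:] is tail; int(split[0]) succeeds under isdigit, ported as (ofStr? …).getD 0;
-- the heterogeneous [int] + rest list is ported as the pair (int, rest)
def pyA_buckets (splits : List (List String)) :
    List (Int × List String) × List (List String) × List (List String) ×
      List (List String) × List (List String) :=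
  splits.foldl (fun acc s =>
    if PySem.Str.strIsdigit s.headI then
      (acc.1 ++ [((PySem.Int.ofStr? s.headI).getD 0, s.tail)], acc.2.1, acc.2.2.1, acc.2.2.2.1, acc.2.2.2.2)
    else if s.headI = "X" then
      (acc.1, acc.2.1 ++ [s], acc.2.2.1, acc.2.2.2.1, acc.2.2.2.2)
    else if s.headI = "Y" then
      (acc.1, acc.2.1, acc.2.2.1 ++ [s], acc.2.2.2.1, acc.2.2.2.2)
    else if s.headI = "M" then
      (acc.1, acc.2.1, acc.2.2.1, acc.2.2.2.1 ++ [s], acc.2.2.2.2)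
    else
      (acc.1, acc.2.1, acc.2.2.1, acc.2.2.2.1, acc.2.2.2.2 ++ [s])) ([], [], [], [], [])

-- the Python list values being sorted compare lexicographically: ported as toLex keys
def pyA_core (cs : List String) : List String :=
  let splits := cs.map pyA_split
  let b := pyA_buckets splits
  let numS := PySem.List.sorted b.1 (fun c => toLex (c.1, c.2))
  let xS := PySem.List.sorted b.2.1 (fun s => s)
  let yS := PySem.List.sorted b.2.2.1 (fun s => s)
  let mS := PySem.List.sorted b.2.2.2.1 (fun s => s)
  let oS := PySem.List.sorted b.2.2.2.2 (fun s => s)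
  let numStr := numS.map (fun c => PySem.Int.toStr c.1 :: c.2)
  (numStr ++ xS ++ yS ++ mS ++ oS).map (fun sc => PySem.Str.join "_" sc)

def sorted_chroms (chroms : List String) : List String :=
  let cnt := pyA_count chroms
  if 0 < cnt ∧ cnt ≠ (chroms.length : Int) then []   -- ValueError branch, excluded by Pre_
  else
    let cs := if cnt = (chroms.length : Int)
      then chroms.map (fun c => PySem.Str.slice c (some 3) none)  -- c[3:]
      else chroms
    let ordered := pyA_core cs
    if 0 < cnt then ordered.map (fun c => "chr" ++ c) else ordered

-- ===== PORT B =====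
-- identical 'chr'-prefix guard, then ONE keyed sort of (key, output) pairs
def pyB_count (chroms : List String) : Int :=
  (chroms.map (fun c => if PySem.Str.startswith c "chr" then (1 : Int) else 0)).sum

def pyB_split (c : String) : List String :=
  (PySem.Str.splitMax? c "_" 1).getD []

-- CATEGORY = {'X': 1, 'Y': 2, 'M': 3}
def pyB_category : PySem.Dict String Int := PySem.Dict.ofList [("X", 1), ("Y", 2), ("M", 3)]

-- the keyed-pair building loop; parts[0]/parts[1:] are headI/tail (parts is nonempty),
-- int(head) under isdigit is (ofStr? …).getD 0
def pyB_keyed (cs : List String) : List ((Int × Int × List String) × String) :=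
  cs.foldl (fun acc c =>
    let parts := pyB_split c
    if PySem.Str.strIsdigit parts.headI then
      let n := (PySem.Int.ofStr? parts.headI).getD 0
      acc ++ [((0, n, parts.tail), PySem.Str.join "_" (PySem.Int.toStr n :: parts.tail))]
    else
      acc ++ [((PySem.Dict.getD pyB_category parts.headI 4, 0, parts), PySem.Str.join "_" parts)]) []

-- keyed.sort(key=lambda kv: kv[0]); Python tuple comparison is lexicographic: toLex key
def pyB_core (cs : List String) : List String :=
  let keyed := pyB_keyed cs
  (PySem.List.sorted keyed (fun kv => toLex (kv.1.1, toLex (kv.1.2.1, kv.1.2.2)))).map (fun kv => kv.2)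

def sorted_chroms_alt (chroms : List String) : List String :=
  let cnt := pyB_count chroms
  if 0 < cnt ∧ cnt ≠ (chroms.length : Int) then []   -- ValueError branch, excluded by Pre_
  else
    let cs := if cnt = (chroms.length : Int)
      then chroms.map (fun c => PySem.Str.slice c (some 3) none)
      else chroms
    let ordered := pyB_core cs
    if 0 < cnt then ordered.map (fun c => "chr" ++ c) else ordered

-- ===== PRECONDITION & SPEC =====
-- Pre_ excludes exactly the mixed-naming inputs on which A raises ValueError
def Pre_sorted_chroms (chroms : List String) : Prop :=
  (∀ c ∈ chroms, PySem.Str.startswith c "chr" = true) ∨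
  (∀ c ∈ chroms, PySem.Str.startswith c "chr" = false)
instance (chroms : List String) : Decidable (Pre_sorted_chroms chroms) := by
  unfold Pre_sorted_chroms; infer_instance

def pvWitness_sorted_chroms : List String := ["chr10", "chr2_alt", "chrX", "chr01"]

def Spec_sorted_chroms (chroms : List String) (out : List String) : Prop := out = sorted_chroms_alt chroms
instance (chroms : List String) (out : List String) : Decidable (Spec_sorted_chroms chroms out) := by unfold Spec_sorted_chroms; infer_instance

-- ===== CLAIM (what is proved, stated in full; the proofs are below) =====
def Claim_equal_sorted_chroms : Prop := ∀ (chroms : List String), Dom_sorted_chroms chroms → Pre_sorted_chroms chroms → Spec_sorted_chroms chroms (sorted_chroms chroms)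

-- ===== LEMMAS AND PROOFS =====

-- key of a keyed pair, as B's sort compares it (Python tuple order = lexicographic)
def pvBkey (kv : (Int × Int × List String) × String) : Lex (Int × Lex (Int × List String)) :=
  toLex (kv.1.1, toLex (kv.1.2.1, kv.1.2.2))

-- the five mutually exclusive, exhaustive branch tests of A's loop
def pvQ0 (s : List String) : Bool := PySem.Str.strIsdigit s.headI
def pvQ1 (s : List String) : Bool := !pvQ0 s && decide (s.headI = "X")
def pvQ2 (s : List String) : Bool := !pvQ0 s && !decide (s.headI = "X") && decide (s.headI = "Y")
def pvQ3 (s : List String) : Bool :=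
  !pvQ0 s && !decide (s.headI = "X") && !decide (s.headI = "Y") && decide (s.headI = "M")
def pvQ4 (s : List String) : Bool :=
  !pvQ0 s && !decide (s.headI = "X") && !decide (s.headI = "Y") && !decide (s.headI = "M")

def pvG0 (s : List String) : Int × List String := ((PySem.Int.ofStr? s.headI).getD 0, s.tail)

def pvF0 (c : Int × List String) : (Int × Int × List String) × String :=
  ((0, c.1, c.2), PySem.Str.join "_" (PySem.Int.toStr c.1 :: c.2))
def pvFC (i : Int) (s : List String) : (Int × Int × List String) × String :=
  ((i, 0, s), PySem.Str.join "_" s)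
def pvGs (s : List String) : (Int × Int × List String) × String :=
  if PySem.Str.strIsdigit s.headI then pvF0 (pvG0 s)
  else pvFC (PySem.Dict.getD pyB_category s.headI 4) s

lemma pvCatD (h : String) :
    PySem.Dict.getD pyB_category h 4 =
      if h = "X" then 1 else if h = "Y" then 2 else if h = "M" then 3 else 4 := by
  by_cases hX : h = "X"
  · subst hX; rw [if_pos rfl]; rfl
  · rw [if_neg hX]
    by_cases hY : h = "Y"
    · subst hY; rw [if_pos rfl]; rfl
    · rw [if_neg hY]
      by_cases hM : h = "M"
      · subst hM; rw [if_pos rfl]; rfl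
      · rw [if_neg hM]
        have n1 : ("X" : String) ≠ h := fun e => hX e.symm
        have n2 : ("Y" : String) ≠ h := fun e => hY e.symm
        have n3 : ("M" : String) ≠ h := fun e => hM e.symm
        rw [show pyB_category = PySem.Dict.mk [("X", (1 : Int)), ("Y", 2), ("M", 3)] from rfl]
        simp [PySem.Dict.getD_eq_get?_getD, PySem.Dict.get?_mk_cons, n1, n2, n3,
          PySem.Dict.get?, PySem.Dict.empty]

lemma pvKeyed_eq (cs : List String) : pyB_keyed cs = (cs.map pyB_split).map pvGs := by
  unfold pyB_keyed
  have h : (fun (acc : List ((Int × Int × List String) × String)) (c : String) =>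
      let parts := pyB_split c
      if PySem.Str.strIsdigit parts.headI then
        let n := (PySem.Int.ofStr? parts.headI).getD 0
        acc ++ [((0, n, parts.tail), PySem.Str.join "_" (PySem.Int.toStr n :: parts.tail))]
      else
        acc ++ [((PySem.Dict.getD pyB_category parts.headI 4, 0, parts), PySem.Str.join "_" parts)])
      = fun acc c => acc ++ [pvGs (pyB_split c)] := by
    funext acc c
    simp only [pvGs, pvF0, pvG0, pvFC]
    split <;> rfl
  rw [h, PySem.List.foldl_append_singleton_eq_map]
  simp [List.map_map, Function.comp_def]

lemma pvBuckets_eq (splits : List (List String)) :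
    pyA_buckets splits =
      ((splits.filter pvQ0).map pvG0, splits.filter pvQ1, splits.filter pvQ2,
        splits.filter pvQ3, splits.filter pvQ4) := by
  suffices h : ∀ (sp : List (List String)) a0 a1 a2 a3 a4,
      sp.foldl (fun acc s =>
        if PySem.Str.strIsdigit s.headI then
          (acc.1 ++ [((PySem.Int.ofStr? s.headI).getD 0, s.tail)], acc.2.1, acc.2.2.1, acc.2.2.2.1, acc.2.2.2.2)
        else if s.headI = "X" then
          (acc.1, acc.2.1 ++ [s], acc.2.2.1, acc.2.2.2.1, acc.2.2.2.2)
        else if s.headI = "Y" then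
          (acc.1, acc.2.1, acc.2.2.1 ++ [s], acc.2.2.2.1, acc.2.2.2.2)
        else if s.headI = "M" then
          (acc.1, acc.2.1, acc.2.2.1, acc.2.2.2.1 ++ [s], acc.2.2.2.2)
        else
          (acc.1, acc.2.1, acc.2.2.1, acc.2.2.2.1, acc.2.2.2.2 ++ [s])) (a0, a1, a2, a3, a4) =
      (a0 ++ (sp.filter pvQ0).map pvG0, a1 ++ sp.filter pvQ1, a2 ++ sp.filter pvQ2,
        a3 ++ sp.filter pvQ3, a4 ++ sp.filter pvQ4) by
    unfold pyA_buckets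
    simpa using h splits [] [] [] [] []
  intro sp
  induction sp with
  | nil => intro a0 a1 a2 a3 a4; simp
  | cons s t ih =>
    intro a0 a1 a2 a3 a4
    rw [List.foldl_cons]
    by_cases h0 : PySem.Str.strIsdigit s.headI
    · rw [if_pos h0, ih]
      have e0 : pvQ0 s = true := by simpa [pvQ0] using h0
      simp [List.filter_cons, e0, pvQ1, pvQ2, pvQ3, pvQ4, pvG0, List.append_assoc]
    · rw [if_neg h0]
      have e0 : pvQ0 s = false := by simpa [pvQ0] using h0
      by_cases hX : s.headI = "X"
      · rw [if_pos hX, ih]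
        simp [List.filter_cons, e0, hX, pvQ1, pvQ2, pvQ3, pvQ4, List.append_assoc]
      · rw [if_neg hX]
        by_cases hY : s.headI = "Y"
        · rw [if_pos hY, ih]
          simp [List.filter_cons, e0, hX, hY, pvQ1, pvQ2, pvQ3, pvQ4, List.append_assoc]
        · rw [if_neg hY]
          by_cases hM : s.headI = "M"
          · rw [if_pos hM, ih]
            simp [List.filter_cons, e0, hX, hY, hM, pvQ1, pvQ2, pvQ3, pvQ4, List.append_assoc]
          · rw [if_neg hM, ih]
            simp [List.filter_cons, e0, hX, hY, hM, pvQ1, pvQ2, pvQ3, pvQ4, List.append_assoc]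

lemma pvPartition_perm (l : List (List String)) :
    ((((l.filter pvQ0 ++ l.filter pvQ1) ++ l.filter pvQ2) ++ l.filter pvQ3) ++ l.filter pvQ4).Perm
      l := by
  induction l with
  | nil => simp
  | cons s t ih =>
    by_cases h0 : pvQ0 s
    · have h1 : pvQ1 s = false := by simp [pvQ1, h0]
      have h2 : pvQ2 s = false := by simp [pvQ2, h0]
      have h3 : pvQ3 s = false := by simp [pvQ3, h0]
      have h4 : pvQ4 s = false := by simp [pvQ4, h0]
      simp only [List.filter_cons, h0, h1, h2, h3, h4, if_true, Bool.false_eq_true, if_false,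
        List.cons_append]
      exact ih.cons s
    · have h0' : pvQ0 s = false := by simpa using h0
      by_cases hX : s.headI = "X"
      · have h1 : pvQ1 s = true := by simp [pvQ1, h0', hX]
        have h2 : pvQ2 s = false := by simp [pvQ2, hX]
        have h3 : pvQ3 s = false := by simp [pvQ3, hX]
        have h4 : pvQ4 s = false := by simp [pvQ4, hX]
        simp only [List.filter_cons, h0', h1, h2, h3, h4, if_true, Bool.false_eq_true, if_false]
        rw [show ((((t.filter pvQ0 ++ s :: t.filter pvQ1) ++ t.filter pvQ2) ++ t.filter pvQ3) ++ t.filter pvQ4)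
            = t.filter pvQ0 ++ s :: (((t.filter pvQ1 ++ t.filter pvQ2) ++ t.filter pvQ3) ++ t.filter pvQ4) from by
          simp [List.append_assoc]]
        refine List.perm_middle.trans (List.Perm.cons s ?_)
        refine List.Perm.trans ?_ ih
        simp [List.append_assoc]
      · by_cases hY : s.headI = "Y"
        · have h1 : pvQ1 s = false := by simp [pvQ1, hX]
          have h2 : pvQ2 s = true := by simp [pvQ2, h0', hX, hY]
          have h3 : pvQ3 s = false := by simp [pvQ3, hY]
          have h4 : pvQ4 s = false := by simp [pvQ4, hY]
          simp only [List.filter_cons, h0', h1, h2, h3, h4, if_true, Bool.false_eq_true, if_false]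
          rw [show (((t.filter pvQ0 ++ t.filter pvQ1) ++ s :: t.filter pvQ2) ++ t.filter pvQ3) ++ t.filter pvQ4
              = (t.filter pvQ0 ++ t.filter pvQ1) ++ s :: ((t.filter pvQ2 ++ t.filter pvQ3) ++ t.filter pvQ4) from by
            simp [List.append_assoc]]
          refine List.perm_middle.trans (List.Perm.cons s ?_)
          refine List.Perm.trans ?_ ih
          simp [List.append_assoc]
        · by_cases hM : s.headI = "M"
          · have h1 : pvQ1 s = false := by simp [pvQ1, hX]
            have h2 : pvQ2 s = false := by simp [pvQ2, hY]
            have h3 : pvQ3 s = true := by simp [pvQ3, h0', hX, hY, hM]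
            have h4 : pvQ4 s = false := by simp [pvQ4, hM]
            simp only [List.filter_cons, h0', h1, h2, h3, h4, if_true, Bool.false_eq_true, if_false]
            rw [show (((t.filter pvQ0 ++ t.filter pvQ1) ++ t.filter pvQ2) ++ s :: t.filter pvQ3) ++ t.filter pvQ4
                = ((t.filter pvQ0 ++ t.filter pvQ1) ++ t.filter pvQ2) ++ s :: (t.filter pvQ3 ++ t.filter pvQ4) from by
              simp [List.append_assoc]]
            refine List.perm_middle.trans (List.Perm.cons s ?_)
            refine List.Perm.trans ?_ ih
            simp [List.append_assoc]
          · have h1 : pvQ1 s = false := by simp [pvQ1, hX]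
            have h2 : pvQ2 s = false := by simp [pvQ2, hY]
            have h3 : pvQ3 s = false := by simp [pvQ3, hM]
            have h4 : pvQ4 s = true := by simp [pvQ4, h0', hX, hY, hM]
            simp only [List.filter_cons, h0', h1, h2, h3, h4, if_true, Bool.false_eq_true, if_false]
            exact List.perm_middle.trans (List.Perm.cons s ih)

-- uniqueness of a key-ordered arrangement when equal keys force equal elements
lemma pvSorted_unique {α κ : Type} [LinearOrder κ] (k : α → κ) :
    ∀ (l1 l2 : List α), l1.Perm l2 → l1.Pairwise (fun a b => k a ≤ k b) →
      l2.Pairwise (fun a b => k a ≤ k b) →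
      (∀ a ∈ l1, ∀ b ∈ l1, k a = k b → a = b) → l1 = l2 := by
  intro l1
  induction l1 with
  | nil =>
    intro l2 hp _ _ _
    exact (hp.symm.eq_nil).symm
  | cons a t ih =>
    intro l2 hp h1 h2 hfun
    cases l2 with
    | nil => exact absurd hp.eq_nil (List.cons_ne_nil a t)
    | cons b t2 =>
      have hba : b ∈ a :: t := hp.symm.subset (List.mem_cons_self ..)
      have hab : a ∈ b :: t2 := hp.subset (List.mem_cons_self ..)
      have hk1 : k a ≤ k b := by
        rcases List.mem_cons.mp hba with h | h
        · exact le_of_eq (congrArg k h.symm)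
        · exact (List.pairwise_cons.mp h1).1 b h
      have hk2 : k b ≤ k a := by
        rcases List.mem_cons.mp hab with h | h
        · exact le_of_eq (congrArg k h.symm)
        · exact (List.pairwise_cons.mp h2).1 a h
      have heq : a = b := hfun a (List.mem_cons_self ..) b hba (le_antisymm hk1 hk2)
      subst heq
      have hp' : t.Perm t2 := hp.cons_inv
      rw [ih t2 hp' (List.pairwise_cons.mp h1).2 (List.pairwise_cons.mp h2).2
        (fun x hx y hy hxy => hfun x (List.mem_cons_of_mem a hx) y (List.mem_cons_of_mem a hy) hxy)]

lemma pvGs_inj (s t : List String) (h : pvBkey (pvGs s) = pvBkey (pvGs t)) : pvGs s = pvGs t := by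
  by_cases hs : PySem.Str.strIsdigit s.headI <;> by_cases ht : PySem.Str.strIsdigit t.headI
  · simp only [pvGs, hs, ht, if_true, pvF0, pvG0, pvBkey, ite_true] at h ⊢
    simp only [toLex_inj, Prod.mk.injEq] at h
    simp [h.2.1, h.2.2]
  · exfalso
    simp only [pvGs, hs, ht, pvF0, pvG0, pvFC, pvBkey, ite_true, ite_false, Bool.false_eq_true,
      if_false, if_true] at h
    simp only [toLex_inj, Prod.mk.injEq] at h
    have h0 := h.1
    rw [pvCatD] at h0
    split_ifs at h0 <;> omega
  · exfalso
    simp only [pvGs, hs, ht, pvF0, pvG0, pvFC, pvBkey, ite_true, ite_false, Bool.false_eq_true,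
      if_false, if_true] at h
    simp only [toLex_inj, Prod.mk.injEq] at h
    have h0 := h.1
    rw [pvCatD] at h0
    split_ifs at h0 <;> omega
  · simp only [pvGs, hs, ht, pvFC, pvBkey, ite_false, Bool.false_eq_true, if_false] at h ⊢
    simp only [toLex_inj, Prod.mk.injEq] at h
    simp [h.1, h.2.2]

-- A's concatenation of sorted buckets, keyed
def pvL1 (splits : List (List String)) : List ((Int × Int × List String) × String) :=
  (PySem.List.sorted ((splits.filter pvQ0).map pvG0) (fun c => toLex (c.1, c.2))).map pvF0 ++
  (PySem.List.sorted (splits.filter pvQ1) (fun s => s)).map (pvFC 1) ++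
  (PySem.List.sorted (splits.filter pvQ2) (fun s => s)).map (pvFC 2) ++
  (PySem.List.sorted (splits.filter pvQ3) (fun s => s)).map (pvFC 3) ++
  (PySem.List.sorted (splits.filter pvQ4) (fun s => s)).map (pvFC 4)

lemma pvAcore_eq (cs : List String) :
    pyA_core cs = (pvL1 (cs.map pyA_split)).map (fun kv => kv.2) := by
  show (((PySem.List.sorted (pyA_buckets (cs.map pyA_split)).1
          (fun c => toLex (c.1, c.2))).map (fun c => PySem.Int.toStr c.1 :: c.2) ++
        PySem.List.sorted (pyA_buckets (cs.map pyA_split)).2.1 (fun s => s) ++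
        PySem.List.sorted (pyA_buckets (cs.map pyA_split)).2.2.1 (fun s => s) ++
        PySem.List.sorted (pyA_buckets (cs.map pyA_split)).2.2.2.1 (fun s => s) ++
        PySem.List.sorted (pyA_buckets (cs.map pyA_split)).2.2.2.2 (fun s => s)).map
        (fun sc => PySem.Str.join "_" sc)) = (pvL1 (cs.map pyA_split)).map (fun kv => kv.2)
  rw [pvBuckets_eq]
  unfold pvL1
  simp [List.map_append, List.map_map, Function.comp_def, pvF0, pvFC]

lemma pvPw0 (ll : List (Int × List String)) :
    ((PySem.List.sorted ll (fun c => toLex (c.1, c.2))).map pvF0).Pairwise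
      (fun a b => pvBkey a ≤ pvBkey b) := by
  refine List.Pairwise.map _ ?_ (PySem.List.sorted_pairwise ll _)
  intro a b hab
  show toLex ((0 : Int), toLex (a.1, a.2)) ≤ toLex ((0 : Int), toLex (b.1, b.2))
  rw [Prod.Lex.toLex_le_toLex]
  exact Or.inr ⟨rfl, hab⟩

lemma pvPwC (i : Int) (ll : List (List String)) :
    ((PySem.List.sorted ll (fun s => s)).map (pvFC i)).Pairwise
      (fun a b => pvBkey a ≤ pvBkey b) := by
  have hdec : (fun (a b : List String) => a.decidableLT b) =
      (LinearOrder.toDecidableLT : DecidableLT (List String)) := by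
    funext a b; exact Subsingleton.elim _ _
  have e : PySem.List.sorted ll (fun s : List String => s) false =
      @PySem.List.sorted (List String) (List String) List.instLinearOrder.toLT
        LinearOrder.toDecidableLT ll (fun s => s) false := by
    rw [← hdec]
  rw [show PySem.List.sorted ll (fun s : List String => s) = PySem.List.sorted ll (fun s : List String => s) false from rfl, e]
  refine List.Pairwise.map _ ?_ (PySem.List.sorted_pairwise (κ := List String) ll (fun s => s))
  intro a b hab
  show toLex (i, toLex ((0 : Int), a)) ≤ toLex (i, toLex ((0 : Int), b))
  rw [Prod.Lex.toLex_le_toLex]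
  refine Or.inr ⟨rfl, ?_⟩
  rw [Prod.Lex.toLex_le_toLex]
  exact Or.inr ⟨rfl, hab⟩

lemma pvCross {i j : Int} (hij : i < j) {a b : (Int × Int × List String) × String}
    (ha : a.1.1 = i) (hb : b.1.1 = j) : pvBkey a ≤ pvBkey b := by
  unfold pvBkey
  apply le_of_lt
  rw [Prod.Lex.toLex_lt_toLex]
  exact Or.inl (by rw [ha, hb]; exact hij)

lemma pvFst_mem0 {ll : List (Int × List String)} {x : (Int × Int × List String) × String}
    (hx : x ∈ ll.map pvF0) : x.1.1 = 0 := by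
  obtain ⟨c, _, rfl⟩ := List.mem_map.mp hx
  rfl

lemma pvFst_memC {i : Int} {ll : List (List String)} {x : (Int × Int × List String) × String}
    (hx : x ∈ ll.map (pvFC i)) : x.1.1 = i := by
  obtain ⟨c, _, rfl⟩ := List.mem_map.mp hx
  rfl

lemma pvPw_L1 (splits : List (List String)) :
    (pvL1 splits).Pairwise (fun a b => pvBkey a ≤ pvBkey b) := by
  unfold pvL1
  refine List.pairwise_append.mpr ⟨List.pairwise_append.mpr ⟨List.pairwise_append.mpr
    ⟨List.pairwise_append.mpr ⟨pvPw0 _, pvPwC 1 _, ?_⟩, pvPwC 2 _, ?_⟩, pvPwC 3 _, ?_⟩,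
    pvPwC 4 _, ?_⟩
  · intro a ha b hb
    exact pvCross (by norm_num) (pvFst_mem0 ha) (pvFst_memC hb)
  · intro a ha b hb
    rcases List.mem_append.mp ha with h | h
    · exact pvCross (by norm_num) (pvFst_mem0 h) (pvFst_memC hb)
    · exact pvCross (by norm_num) (pvFst_memC h) (pvFst_memC hb)
  · intro a ha b hb
    rcases List.mem_append.mp ha with h | h
    · rcases List.mem_append.mp h with h' | h'
      · exact pvCross (by norm_num) (pvFst_mem0 h') (pvFst_memC hb)
      · exact pvCross (by norm_num) (pvFst_memC h') (pvFst_memC hb)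
    · exact pvCross (by norm_num) (pvFst_memC h) (pvFst_memC hb)
  · intro a ha b hb
    rcases List.mem_append.mp ha with h | h
    · rcases List.mem_append.mp h with h' | h'
      · rcases List.mem_append.mp h' with h'' | h''
        · exact pvCross (by norm_num) (pvFst_mem0 h'') (pvFst_memC hb)
        · exact pvCross (by norm_num) (pvFst_memC h'') (pvFst_memC hb)
      · exact pvCross (by norm_num) (pvFst_memC h') (pvFst_memC hb)
    · exact pvCross (by norm_num) (pvFst_memC h) (pvFst_memC hb)

lemma pvPerm_L1 (splits : List (List String)) : (pvL1 splits).Perm (splits.map pvGs) := by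
  have h0 : ((PySem.List.sorted ((splits.filter pvQ0).map pvG0) (fun c => toLex (c.1, c.2))).map pvF0).Perm
      ((splits.filter pvQ0).map pvGs) := by
    refine ((PySem.List.sorted_perm _ _ _).map pvF0).trans ?_
    rw [List.map_map, List.map_congr_left (g := pvGs) ?_]
    intro s hs
    have hq := (List.mem_filter.mp hs).2
    simp only [pvQ0] at hq
    show pvF0 (pvG0 s) = pvGs s
    unfold pvGs
    rw [if_pos hq]
  have hstep : ∀ (i : Int) (q : List String → Bool),
      (∀ s, q s = true → pvFC i s = pvGs s) →
      ((PySem.List.sorted (splits.filter q) (fun s => s)).map (pvFC i)).Perm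
        ((splits.filter q).map pvGs) := by
    intro i q hq
    refine ((PySem.List.sorted_perm _ _ _).map (pvFC i)).trans ?_
    rw [List.map_congr_left (g := pvGs) ?_]
    intro s hs
    exact hq s (List.mem_filter.mp hs).2
  have h1 := hstep 1 pvQ1 (by
    intro s hq
    simp only [pvQ1, pvQ0, Bool.and_eq_true, Bool.not_eq_true', decide_eq_true_eq] at hq
    obtain ⟨hd, hX⟩ := hq
    have hd' : ¬ (PySem.Str.strIsdigit s.headI = true) := by rw [hd]; simp
    unfold pvGs
    rw [if_neg hd', pvCatD, if_pos hX])
  have h2 := hstep 2 pvQ2 (by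
    intro s hq
    simp only [pvQ2, pvQ0, Bool.and_eq_true, Bool.not_eq_true', decide_eq_true_eq,
      Bool.not_eq_eq_eq_not, Bool.not_true, decide_eq_false_iff_not] at hq
    obtain ⟨⟨hd, hX⟩, hY⟩ := hq
    have hd' : ¬ (PySem.Str.strIsdigit s.headI = true) := by rw [hd]; simp
    unfold pvGs
    rw [if_neg hd', pvCatD, if_neg hX, if_pos hY])
  have h3 := hstep 3 pvQ3 (by
    intro s hq
    simp only [pvQ3, pvQ0, Bool.and_eq_true, Bool.not_eq_true', decide_eq_true_eq,
      Bool.not_eq_eq_eq_not, Bool.not_true, decide_eq_false_iff_not] at hq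
    obtain ⟨⟨⟨hd, hX⟩, hY⟩, hM⟩ := hq
    have hd' : ¬ (PySem.Str.strIsdigit s.headI = true) := by rw [hd]; simp
    unfold pvGs
    rw [if_neg hd', pvCatD, if_neg hX, if_neg hY, if_pos hM])
  have h4 := hstep 4 pvQ4 (by
    intro s hq
    simp only [pvQ4, pvQ0, Bool.and_eq_true, Bool.not_eq_true', decide_eq_true_eq,
      Bool.not_eq_eq_eq_not, Bool.not_true, decide_eq_false_iff_not] at hq
    obtain ⟨⟨⟨hd, hX⟩, hY⟩, hM⟩ := hq
    have hd' : ¬ (PySem.Str.strIsdigit s.headI = true) := by rw [hd]; simp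
    unfold pvGs
    rw [if_neg hd', pvCatD, if_neg hX, if_neg hY, if_neg hM])
  unfold pvL1
  refine ((((h0.append h1).append h2).append h3).append h4).trans ?_
  rw [← List.map_append, ← List.map_append, ← List.map_append, ← List.map_append]
  exact (pvPartition_perm splits).map pvGs

lemma pvCore_eq : pyA_core = pyB_core := by
  funext cs
  have hL : pvL1 (cs.map pyA_split) = PySem.List.sorted (pyB_keyed cs) pvBkey := by
    refine pvSorted_unique pvBkey _ _ ?_ (pvPw_L1 _) (PySem.List.sorted_pairwise _ _) ?_
    · refine (pvPerm_L1 _).trans ?_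
      have : (cs.map pyA_split).map pvGs = pyB_keyed cs := (pvKeyed_eq cs).symm
      rw [this]
      exact (PySem.List.sorted_perm _ _ _).symm
    · intro a ha b hb hk
      obtain ⟨s, _, rfl⟩ := List.mem_map.mp ((pvPerm_L1 _).subset ha)
      obtain ⟨t, _, rfl⟩ := List.mem_map.mp ((pvPerm_L1 _).subset hb)
      exact pvGs_inj s t hk
  show pyA_core cs = pyB_core cs
  rw [pvAcore_eq, hL]
  rfl

-- ===== VERDICT (by name: the statement is the Claim_ definition above) =====
theorem sorted_chroms_spec : Claim_equal_sorted_chroms := by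
  intro chroms _ _
  unfold Spec_sorted_chroms sorted_chroms sorted_chroms_alt
  have hc : pyB_count = pyA_count := rfl
  simp only [hc, pvCore_eq]
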